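-- pv_equiv track=rewrite | github.com/nicky-eng/Escuelita_Gabo_Lato | Ej_9_1_beta.py | tuplas_a_dic
-- ===== SOURCE A (Python) =====
-- def tuplas_a_dic(lista):
--     """Toma una lista de tuplas y genera un diccionario donde las claves son
--     el primer elemnto de la tupla y los valores una lista de los demás elementos."""
--
--     diccionario ={}
--     lista_aux = []
--     for i in lista:
--         for j in range(1, len(i)):
--             lista_aux.append(i[j])
--             if i[0] in diccionario:
--                 diccionario[i[0]] = diccionario[i[0]] + lista_aux
--             else:
--                 diccionario[i[0]] = [i[1]]
--             lista_aux = []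
--     return diccionario
-- ===== SOURCE B (Python) =====
-- def tuplas_a_dic(lista):
--     """Toma una lista de tuplas y genera un diccionario donde las claves son
--     el primer elemnto de la tupla y los valores una lista de los demás elementos."""
--     claves = list(dict.fromkeys(t[0] for t in lista if len(t) >= 2))
--     return {k: [x for t in lista if len(t) >= 2 and t[0] == k for x in t[1:]]
--             for k in claves}
-- ===== Notes on version B (the rewrite author's own statement) =====
-- stated objective: alternative
-- what changed: A builds the dict in one accumulating pass, re-copying the key's growing value list on every appended element; B first computes the ordered distinct keys (dict.fromkeys) and then gathers each key's suffix values with a per-key comprehension over the list.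
import Mathlib
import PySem

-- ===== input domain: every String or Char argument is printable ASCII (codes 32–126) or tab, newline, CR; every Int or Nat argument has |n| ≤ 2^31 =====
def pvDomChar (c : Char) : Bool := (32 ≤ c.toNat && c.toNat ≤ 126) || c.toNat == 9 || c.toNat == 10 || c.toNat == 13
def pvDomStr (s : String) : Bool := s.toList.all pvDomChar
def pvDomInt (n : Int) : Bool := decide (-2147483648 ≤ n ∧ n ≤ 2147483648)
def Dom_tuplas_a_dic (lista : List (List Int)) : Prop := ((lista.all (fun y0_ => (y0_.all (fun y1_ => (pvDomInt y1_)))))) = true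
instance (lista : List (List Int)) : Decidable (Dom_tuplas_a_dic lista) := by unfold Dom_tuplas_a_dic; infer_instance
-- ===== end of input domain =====

-- B builds the ordered distinct keys first and then gathers each key's suffix values by
-- re-scanning the list per key, instead of A's single accumulating pass with an aux buffer.

-- ===== PORT A =====
-- i[j], i[0], i[1] are always in range here (1 ≤ j < len(i) implies len(i) ≥ 2), so pyGetD is exact.
def tuplas_a_dic (lista : List (List Int)) : List (Int × List Int) :=
  (lista.foldl (fun d i =>
      (PySem.List.pyRange 1 (i.length : Int) 1).foldl (fun d j =>
        let aux := [PySem.List.pyGetD i j 0]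
        if d.contains (PySem.List.pyGetD i 0 0) then
          d.insert (PySem.List.pyGetD i 0 0) (d.getD (PySem.List.pyGetD i 0 0) [] ++ aux)
        else
          d.insert (PySem.List.pyGetD i 0 0) [PySem.List.pyGetD i 1 0]) d)
    (PySem.Dict.empty : PySem.Dict Int (List Int))).items

-- ===== PORT B =====
-- t[0] is only semantically relevant when the first conjunct len(t) >= 2 holds (Python's
-- short-circuit 'and'); pyGetD's default is never the decider since the conjunction is
-- already false on short tuples.
def tuplas_a_dic_alt (lista : List (List Int)) : List (Int × List Int) :=
  let claves := PySem.List.dedup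
    ((lista.filter (fun t => decide (2 ≤ t.length))).map (fun t => PySem.List.pyGetD t 0 0))
  claves.map (fun k =>
    (k, (lista.filter (fun t => decide (2 ≤ t.length) && (PySem.List.pyGetD t 0 0 == k))).flatMap
          (fun t => PySem.List.slice t (some 1) none)))

-- ===== PRECONDITION & SPEC =====
def Spec_tuplas_a_dic (lista : List (List Int)) (out : List (Int × List Int)) : Prop := out = tuplas_a_dic_alt lista
instance (lista : List (List Int)) (out : List (Int × List Int)) : Decidable (Spec_tuplas_a_dic lista out) := by unfold Spec_tuplas_a_dic; infer_instance

-- ===== CLAIM (what is proved, stated in full; the proofs are below) =====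
def Claim_equal_tuplas_a_dic : Prop := ∀ (lista : List (List Int)), Dom_tuplas_a_dic lista → Spec_tuplas_a_dic lista (tuplas_a_dic lista)

-- ===== LEMMAS AND PROOFS =====

def keyOf (t : List Int) : Int := PySem.List.pyGetD t 0 0

def goods (l : List (List Int)) : List (List Int) := l.filter (fun t => decide (2 ≤ t.length))

def gather (l : List (List Int)) (k : Int) : List Int :=
  ((goods l).filter (fun t => keyOf t == k)).flatMap List.tail

def G (l : List (List Int)) : List (Int × List Int) :=
  (PySem.Set.ofList ((goods l).map keyOf)).map (fun k => (k, gather l k))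

def stepA (d : PySem.Dict Int (List Int)) (i : List Int) : PySem.Dict Int (List Int) :=
  (PySem.List.pyRange 1 (i.length : Int) 1).foldl (fun d j =>
    let aux := [PySem.List.pyGetD i j 0]
    if d.contains (PySem.List.pyGetD i 0 0) then
      d.insert (PySem.List.pyGetD i 0 0) (d.getD (PySem.List.pyGetD i 0 0) [] ++ aux)
    else
      d.insert (PySem.List.pyGetD i 0 0) [PySem.List.pyGetD i 1 0]) d

lemma tuplas_eq_fold (lista : List (List Int)) :
    tuplas_a_dic lista = (lista.foldl stepA PySem.Dict.empty).items := rfl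

lemma dict_insert_insert (d : PySem.Dict Int (List Int)) (k : Int) (v w : List Int) :
    (d.insert k v).insert k w = d.insert k w := by
  apply PySem.Dict.ext
  by_cases h : d.contains k = true
  · rw [PySem.Dict.items_insert_of_contains _ w (PySem.Dict.contains_insert_self d k v),
        PySem.Dict.items_insert_of_contains d v h,
        PySem.Dict.items_insert_of_contains d w h, List.map_map]
    apply List.map_congr_left
    intro p _
    by_cases hp : p.1 = k <;> simp [hp]
  · have h' : d.contains k = false := by simpa using h
    have hk : ∀ p ∈ d.items, (p.1 == k) = false := by
      intro p hp
      rw [beq_eq_false_iff_ne]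
      intro he
      apply h
      rw [PySem.Dict.contains_iff_mem_keys]
      simp only [PySem.Dict.keys]
      exact he ▸ List.mem_map_of_mem hp
    rw [PySem.Dict.items_insert_of_contains _ w (PySem.Dict.contains_insert_self d k v),
        PySem.Dict.items_insert_of_not_contains d v h',
        PySem.Dict.items_insert_of_not_contains d w h', List.map_append]
    have hmap : d.items.map (fun p => if (p.1 == k) = true then (k, w) else p)
        = d.items.map id := by
      apply List.map_congr_left
      intro p hp
      simp [hk p hp]
    rw [hmap, List.map_id]
    simp

-- the inner loop body as a function of the current dict and the fetched element
def innerF (k c : Int) (d : PySem.Dict Int (List Int)) (x : Int) : PySem.Dict Int (List Int) :=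
  if d.contains k then d.insert k (d.getD k [] ++ [x]) else d.insert k [c]

lemma fold_innerF_contains (k c : Int) :
    ∀ (ts : List Int) (x : Int) (d : PySem.Dict Int (List Int)), d.contains k = true →
      (x :: ts).foldl (innerF k c) d = d.insert k (d.getD k [] ++ x :: ts) := by
  intro ts
  induction ts with
  | nil =>
      intro x d h
      simp [innerF, h]
  | cons y ts ih =>
      intro x d h
      have step : (x :: y :: ts).foldl (innerF k c) d
          = (y :: ts).foldl (innerF k c) (d.insert k (d.getD k [] ++ [x])) := by
        simp [List.foldl_cons, innerF, h]
      rw [step, ih y _ (PySem.Dict.contains_insert_self d k _)]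
      rw [PySem.Dict.getD_insert_self, dict_insert_insert]
      simp

lemma fold_innerF_not (k b : Int) (rest : List Int) (d : PySem.Dict Int (List Int))
    (h : d.contains k = false) :
    (b :: rest).foldl (innerF k b) d = d.insert k (b :: rest) := by
  cases rest with
  | nil => simp [innerF, h]
  | cons y ts =>
      have step : (b :: y :: ts).foldl (innerF k b) d
          = (y :: ts).foldl (innerF k b) (d.insert k [b]) := by
        simp [List.foldl_cons, innerF, h]
      rw [step, fold_innerF_contains k b ts y _ (PySem.Dict.contains_insert_self d k _)]
      rw [PySem.Dict.getD_insert_self, dict_insert_insert]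
      simp

lemma stepA_eq (i : List Int) (d : PySem.Dict Int (List Int)) :
    stepA d i = if 2 ≤ i.length then
        (if d.contains (keyOf i) then d.insert (keyOf i) (d.getD (keyOf i) [] ++ i.tail)
         else d.insert (keyOf i) i.tail)
      else d := by
  have hfold : stepA d i = (i.drop 1).foldl
      (innerF (PySem.List.pyGetD i 0 0) (PySem.List.pyGetD i 1 0)) d := by
    have := PySem.List.foldl_pyRange_pyGetD' i 0
      (innerF (PySem.List.pyGetD i 0 0) (PySem.List.pyGetD i 1 0)) d (a := 1) (by norm_num)
    simpa [stepA, innerF] using this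
  rw [hfold]
  by_cases h : 2 ≤ i.length
  · match i, h with
    | a :: b :: rest, _ =>
      have hk : keyOf (a :: b :: rest) = a := by simp [keyOf, PySem.List.pyGetD_zero_cons]
      have hk0 : PySem.List.pyGetD (a :: b :: rest) 0 0 = a := by
        simp [PySem.List.pyGetD_zero_cons]
      have hk1 : PySem.List.pyGetD (a :: b :: rest) 1 0 = b := by
        simp [pysem]
      rw [hk0, hk1]
      simp only [List.drop_succ_cons, List.drop_zero, List.tail_cons, hk]
      by_cases hc : d.contains a = true
      · rw [fold_innerF_contains a b rest b d hc]
        simp [hc]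
      · have hc' : d.contains a = false := by simpa using hc
        rw [fold_innerF_not a b rest d hc']
        simp [hc']
  · have hd : i.drop 1 = [] := by
      cases i with
      | nil => rfl
      | cons a t => cases t with
        | nil => rfl
        | cons b t' => exact absurd (by simp) h
    rw [hd]
    simp [h]

lemma map_fst_G (l : List (List Int)) :
    (G l).map Prod.fst = PySem.Set.ofList ((goods l).map keyOf) := by
  simp [G, Function.comp_def]


lemma goods_append_good (p : List (List Int)) (i : List Int) (h : 2 ≤ i.length) :
    goods (p ++ [i]) = goods p ++ [i] := by
  simp [goods, List.filter_append, h]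

lemma goods_append_bad (p : List (List Int)) (i : List Int) (h : ¬ 2 ≤ i.length) :
    goods (p ++ [i]) = goods p := by
  simp [goods, List.filter_append, h]

lemma gather_skip (p : List (List Int)) (i : List Int) (k : Int) (h : ¬ 2 ≤ i.length) :
    gather (p ++ [i]) k = gather p k := by
  unfold gather
  rw [goods_append_bad p i h]

lemma gather_hit (p : List (List Int)) (i : List Int) (k : Int) (h : 2 ≤ i.length) :
    gather (p ++ [i]) k = gather p k ++ (if keyOf i == k then i.tail else []) := by
  unfold gather
  rw [goods_append_good p i h, List.filter_append, List.flatMap_append]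
  by_cases hk : (keyOf i == k) = true <;> simp [hk]

lemma gather_none (p : List (List Int)) (k : Int) (h : k ∉ (goods p).map keyOf) :
    gather p k = [] := by
  unfold gather
  have he : (goods p).filter (fun t => keyOf t == k) = [] := by
    rw [List.filter_eq_nil_iff]
    intro t ht
    simp only [beq_iff_eq]
    intro hkt
    exact h (hkt ▸ List.mem_map_of_mem ht)
  rw [he]
  rfl

lemma G_skip (p : List (List Int)) (i : List Int) (h : ¬ 2 ≤ i.length) :
    G (p ++ [i]) = G p := by
  unfold G
  rw [goods_append_bad p i h]
  apply List.map_congr_left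
  intro k _
  rw [gather_skip p i k h]

lemma step_G (p : List (List Int)) (i : List Int) (d : PySem.Dict Int (List Int))
    (hd : d.items = G p) : (stepA d i).items = G (p ++ [i]) := by
  rw [stepA_eq]
  by_cases hg : 2 ≤ i.length
  case neg =>
    rw [if_neg hg, hd, G_skip p i hg]
  case pos =>
    rw [if_pos hg]
    have hkeys : d.keys = PySem.Set.ofList ((goods p).map keyOf) := by
      simp only [PySem.Dict.keys, hd, map_fst_G]
    have hnodup : d.keys.Nodup := by rw [hkeys]; exact PySem.Set.nodup_ofList _
    have hSapp : PySem.Set.ofList ((goods (p ++ [i])).map keyOf)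
        = PySem.Set.add (PySem.Set.ofList ((goods p).map keyOf)) (keyOf i) := by
      rw [goods_append_good p i hg]
      simp [PySem.Set.ofList_append_singleton]
    by_cases hm : keyOf i ∈ (goods p).map keyOf
    · -- key already present
      have hc : d.contains (keyOf i) = true := by
        rw [PySem.Dict.contains_iff_mem_keys, hkeys, PySem.Set.mem_ofList]
        exact hm
      have hmemG : (keyOf i, gather p (keyOf i)) ∈ G p := by
        unfold G
        exact List.mem_map_of_mem (by rw [PySem.Set.mem_ofList]; exact hm)
      have hgetD : d.getD (keyOf i) [] = gather p (keyOf i) :=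
        PySem.Dict.getD_of_mem_items d (hd ▸ hmemG) hnodup []
      rw [if_pos hc, PySem.Dict.items_insert_of_contains d _ hc, hd, hgetD]
      unfold G
      rw [hSapp, PySem.Set.add_of_mem (by rw [PySem.Set.mem_ofList]; exact hm), List.map_map]
      apply List.map_congr_left
      intro k' _
      by_cases hk' : k' = keyOf i
      · subst hk'
        simp [gather_hit p i (keyOf i) hg]
      · have : (keyOf i == k') = false := by simpa using (Ne.symm hk')
        simp [Function.comp, hk', gather_hit p i k' hg, this]
    · -- fresh key
      have hc : d.contains (keyOf i) = false := by
        rw [← Bool.not_eq_true, PySem.Dict.contains_iff_mem_keys, hkeys, PySem.Set.mem_ofList]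
        exact hm
      rw [if_neg (by simp [hc]), PySem.Dict.items_insert_of_not_contains d _ hc, hd]
      unfold G
      rw [hSapp, PySem.Set.add_of_not_mem (by rw [PySem.Set.mem_ofList]; exact hm), List.map_append]
      congr 1
      · apply List.map_congr_left
        intro k' hk'
        have hne : (keyOf i == k') = false := by
          rw [beq_eq_false_iff_ne]
          intro he
          exact hm (by rw [← PySem.Set.mem_ofList]; exact he ▸ hk')
        rw [gather_hit p i k' hg, hne]
        simp
      · rw [List.map_singleton, gather_hit p i (keyOf i) hg, gather_none p (keyOf i) hm]
        simp

lemma foldA_G : ∀ (rest p : List (List Int)) (d : PySem.Dict Int (List Int)),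
    d.items = G p → (rest.foldl stepA d).items = G (p ++ rest) := by
  intro rest
  induction rest with
  | nil => intro p d hd; simpa using hd
  | cons i rest ih =>
      intro p d hd
      have h1 : (stepA d i).items = G (p ++ [i]) := step_G p i d hd
      have h2 := ih (p ++ [i]) (stepA d i) h1
      simpa using h2

lemma A_eq_G (lista : List (List Int)) : tuplas_a_dic lista = G lista := by
  rw [tuplas_eq_fold]
  have := foldA_G lista [] PySem.Dict.empty (by rfl)
  simpa using this

lemma B_eq_G (lista : List (List Int)) : tuplas_a_dic_alt lista = G lista := by
  unfold tuplas_a_dic_alt G gather goods keyOf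
  simp only [PySem.List.dedup_eq_ofList, PySem.List.slice_from_one, List.filter_filter]
  apply List.map_congr_left
  intro k _
  congr 1
  have hf : (List.filter (fun t => decide (2 ≤ t.length) && (PySem.List.pyGetD t 0 0 == k)) lista)
      = List.filter (fun a => (PySem.List.pyGetD a 0 0 == k) && decide (2 ≤ a.length)) lista := by
    apply List.filter_congr
    intro t _
    exact Bool.and_comm _ _
  rw [hf]

-- ===== VERDICT (by name: the statement is the Claim_ definition above) =====
theorem tuplas_a_dic_spec : Claim_equal_tuplas_a_dic := by
  intro lista _
  unfold Spec_tuplas_a_dic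
  rw [A_eq_G, B_eq_G]
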